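-- pv_equiv track=rewrite | github.com/Sirius6907/B.U.D.D.Y-Mark-67 | memory/profiles.py | _upsert_bullet
-- ===== SOURCE A (Python) =====
-- def _upsert_bullet(content: str, section_title: str, key: str, value: str) -> str:
--     header = f"## {section_title}"
--     if header not in content:
--         content = content.rstrip() + f"\n\n{header}\n- {key}: {value}\n"
--         return content
--
--     lines = content.splitlines()
--     output: list[str] = []
--     in_section = False
--     updated = False
--     for idx, line in enumerate(lines):
--         if line == header:
--             in_section = True
--             output.append(line)
--             continue
--         if in_section and line.startswith("## "):
--             if not updated:
--                 output.append(f"- {key}: {value}")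
--                 updated = True
--             in_section = False
--         if in_section and line.startswith(f"- {key}:"):
--             output.append(f"- {key}: {value}")
--             updated = True
--             continue
--         output.append(line)
--
--     if in_section and not updated:
--         output.append(f"- {key}: {value}")
--     return "\n".join(output).rstrip() + "\n"
-- ===== SOURCE B (Python) =====
-- def _upsert_bullet(content: str, section_title: str, key: str, value: str) -> str:
--     header = f"## {section_title}"
--     bullet = f"- {key}: {value}"
--     if header not in content:
--         return content.rstrip() + f"\n\n{header}\n{bullet}\n"
--     prefix = f"- {key}:"
--     lines = content.splitlines()
--     # pass 1: in-section mask (a scan); a same-title header re-opens, any other '## ' line closes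
--     flags = []
--     ins = False
--     for ln in lines:
--         ins = True if ln == header else (False if ln.startswith("## ") else ins)
--         flags.append(ins)
--     # pass 2: replace every in-section key bullet
--     out = [bullet if f and ln.startswith(prefix) else ln for ln, f in zip(lines, flags)]
--     # pass 3: if the first section region holds no key bullet, insert one at its end
--     if header in lines:
--         start = lines.index(header)
--         end = next((i for i in range(start + 1, len(lines)) if not flags[i]), len(lines))
--         if not any(flags[i] and lines[i].startswith(prefix) for i in range(start + 1, end)):
--             out.insert(end, bullet)
--     return "\n".join(out).rstrip() + "\n"
-- ===== Notes on version B (the rewrite author's own statement) =====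
-- stated objective: alternative
-- what changed: Replaces A's single stateful pass (in_section/updated flags deciding replacement and insertion inline) with three staged passes: a scan producing an in-section mask, a zip/map comprehension doing all replacements, and index arithmetic (index of the header line, first mask-false position) locating the single insertion point applied with list.insert.
import Mathlib
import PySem

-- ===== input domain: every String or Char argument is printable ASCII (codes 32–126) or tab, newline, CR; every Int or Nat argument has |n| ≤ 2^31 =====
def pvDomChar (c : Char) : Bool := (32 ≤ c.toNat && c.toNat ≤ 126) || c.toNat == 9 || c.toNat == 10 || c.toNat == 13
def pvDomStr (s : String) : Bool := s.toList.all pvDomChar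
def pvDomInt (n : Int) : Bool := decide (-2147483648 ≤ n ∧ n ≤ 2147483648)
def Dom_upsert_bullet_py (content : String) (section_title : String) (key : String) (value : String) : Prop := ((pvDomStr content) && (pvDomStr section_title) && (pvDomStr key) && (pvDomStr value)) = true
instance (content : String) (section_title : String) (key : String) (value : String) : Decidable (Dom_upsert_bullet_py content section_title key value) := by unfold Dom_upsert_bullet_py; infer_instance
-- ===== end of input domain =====

-- B replaces A's single stateful pass (in_section/updated flags deciding everything inline)
-- by three staged passes: a scan computing an in-section mask, a zip/map doing all
-- replacements, and index arithmetic locating the one insertion point; objective: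
-- alternative decomposition, same cost.

-- ===== PORT A =====
-- A's for-loop over lines with state (in_section, updated); the enumerate index is unused in A.
def pvALoop (header pref bullet : String) : List String → Bool → Bool → List String
  | [], ins, upd => if ins && !upd then [bullet] else []
  | l :: ls, ins, upd =>
    if l = header then
      l :: pvALoop header pref bullet ls true upd
    else if ins && PySem.Str.startswith l "## " then
      -- A inserts the bullet if not yet updated, leaves the section, then appends the line
      if !upd then bullet :: l :: pvALoop header pref bullet ls false true
      else l :: pvALoop header pref bullet ls false upd
    else if ins && PySem.Str.startswith l pref then
      bullet :: pvALoop header pref bullet ls true true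
    else
      l :: pvALoop header pref bullet ls ins upd

def upsert_bullet_py (content : String) (section_title : String) (key : String) (value : String) : String :=
  let header := "## " ++ section_title
  if !(PySem.Str.isIn header content) then
    PySem.Str.rstrip content ++ "\n\n" ++ header ++ "\n" ++ ("- " ++ key ++ ": " ++ value) ++ "\n"
  else
    let lines := PySem.Str.splitlines content
    PySem.Str.rstrip (PySem.Str.join "\n" (pvALoop header ("- " ++ key ++ ":") ("- " ++ key ++ ": " ++ value) lines false false)) ++ "\n"

-- ===== PORT B =====
-- pass 1: the in-section mask, a scan (same-title header re-opens, other '## ' closes)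
def pvFlags (header : String) : List String → Bool → List Bool
  | [], _ => []
  | l :: ls, ins =>
    let ins' := if l = header then true else if PySem.Str.startswith l "## " then false else ins
    ins' :: pvFlags header ls ins'

-- pass 2 body: the comprehension's conditional expression
def pvRep (pref bullet l : String) (f : Bool) : String :=
  if f && PySem.Str.startswith l pref then bullet else l

-- pass 3: python's next(i for i in range(s, len) if not flags[i]) with default len
def pvEnd (flags : List Bool) (s : Nat) : Nat :=
  s + ((flags.drop s).takeWhile (fun b => b)).length

-- pass 3: any(flags[i] and lines[i].startswith(prefix) for i in range(s, e))
def pvHit (pref : String) (lines : List String) (flags : List Bool) (s e : Nat) : Bool :=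
  (((lines.zip flags).drop s).take (e - s)).any (fun lf => lf.2 && PySem.Str.startswith lf.1 pref)

def upsert_bullet_py_alt (content : String) (section_title : String) (key : String) (value : String) : String :=
  let header := "## " ++ section_title
  let bullet := "- " ++ key ++ ": " ++ value
  if !(PySem.Str.isIn header content) then
    PySem.Str.rstrip content ++ "\n\n" ++ header ++ "\n" ++ bullet ++ "\n"
  else
    let pref := "- " ++ key ++ ":"
    let lines := PySem.Str.splitlines content
    let flags := pvFlags header lines false
    let out := List.zipWith (pvRep pref bullet) lines flags
    let out2 :=
      -- 'if header in lines: start = lines.index(header)' — membership and index together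
      match PySem.List.index? lines header with
      | none => out
      | some s =>
        let e := pvEnd flags (s + 1)
        if pvHit pref lines flags (s + 1) e then out
        else PySem.List.insert out (e : Int) bullet
    PySem.Str.rstrip (PySem.Str.join "\n" out2) ++ "\n"

-- ===== PRECONDITION & SPEC =====
def Spec_upsert_bullet_py (content : String) (section_title : String) (key : String) (value : String) (out : String) : Prop := out = upsert_bullet_py_alt content section_title key value
instance (content : String) (section_title : String) (key : String) (value : String) (out : String) : Decidable (Spec_upsert_bullet_py content section_title key value out) := by unfold Spec_upsert_bullet_py; infer_instance

-- ===== CLAIM (what is proved, stated in full; the proofs are below) =====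
def Claim_equal_upsert_bullet_py : Prop := ∀ (content : String) (section_title : String) (key : String) (value : String), Dom_upsert_bullet_py content section_title key value → Spec_upsert_bullet_py content section_title key value (upsert_bullet_py content section_title key value)

-- ===== LEMMAS AND PROOFS =====

theorem pvALoop_updated (header pref bullet : String)
    (hpf : PySem.Str.startswith header pref = false) :
    ∀ (xs : List String) (ins : Bool),
      pvALoop header pref bullet xs ins true =
        List.zipWith (pvRep pref bullet) xs (pvFlags header xs ins) := by
  intro xs
  induction xs with
  | nil => intro ins; simp only [pvALoop, pvFlags, List.zipWith_nil_right, Bool.not_true,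
      Bool.and_false, Bool.false_eq_true, if_false]
  | cons l ls ih =>
    intro ins
    simp only [pvALoop, pvFlags, List.zipWith_cons_cons, pvRep]
    by_cases hh : l = header
    · subst hh
      simp only [if_pos rfl, if_true, ite_true, hpf, Bool.and_false, Bool.false_eq_true, if_false, ih]
    · simp only [if_neg hh]
      by_cases hsec : PySem.Str.startswith l "## " = true
      · simp only [hsec, Bool.and_true, if_neg hh]
        cases ins <;>
          simp only [Bool.false_eq_true, if_false, Bool.true_and, if_true, Bool.not_true,
            Bool.and_false, Bool.false_and, ih, Bool.and_self]
      · simp only [Bool.not_eq_true] at hsec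
        simp only [hsec, Bool.and_false, Bool.false_eq_true, if_false]
        by_cases hpre : PySem.Str.startswith l pref = true
        · simp only [hpre, Bool.and_true, ih]
          cases ins <;> simp only [Bool.false_eq_true, if_false, if_true]
        · simp only [Bool.not_eq_true] at hpre
          simp only [hpre, Bool.and_false, Bool.false_eq_true, if_false, ih]


theorem pvALoop_section (header pref bullet : String)
    (hpf : PySem.Str.startswith header pref = false) :
    ∀ (xs : List String),
      pvALoop header pref bullet xs true false =
        (let fl := pvFlags header xs true
         let e := (fl.takeWhile (fun b => b)).length
         let out := List.zipWith (pvRep pref bullet) xs fl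
         if ((xs.zip fl).take e).any (fun lf => lf.2 && PySem.Str.startswith lf.1 pref) then out
         else out.take e ++ bullet :: out.drop e) := by
  intro xs
  induction xs with
  | nil => simp [pvALoop, pvFlags]
  | cons l ls ih =>
    by_cases hh : l = header
    · subst hh
      simp only [pvALoop, pvFlags, if_pos rfl, if_true, ite_true]
      rw [ih]
      simp only [List.takeWhile_cons, List.zip_cons_cons, List.zipWith_cons_cons, pvRep,
        List.length_cons, List.take_succ_cons, List.drop_succ_cons, List.any_cons,
        hpf, Bool.true_and, Bool.false_or, if_true, ite_true, decide_true,
        Bool.false_eq_true, if_false, List.cons_append]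
      split_ifs <;> rfl
    · by_cases hsec : PySem.Str.startswith l "## " = true
      · simp only [pvALoop, pvFlags, if_neg hh, hsec, Bool.true_and, if_true, ite_true,
          Bool.not_false]
        rw [pvALoop_updated header pref bullet hpf ls false]
        simp only [List.takeWhile_cons, Bool.false_eq_true, if_false, List.length_nil,
          List.take_zero, List.drop_zero, List.any_nil, List.nil_append,
          List.zipWith_cons_cons, pvRep, Bool.false_and]
      · simp only [Bool.not_eq_true] at hsec
        by_cases hpre : PySem.Str.startswith l pref = true
        · simp only [pvALoop, pvFlags, if_neg hh, hsec, hpre, Bool.true_and,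
            Bool.false_eq_true, if_false, if_true, ite_true]
          rw [pvALoop_updated header pref bullet hpf ls true]
          simp only [List.takeWhile_cons, List.zip_cons_cons, List.zipWith_cons_cons, pvRep,
            List.length_cons, List.take_succ_cons, List.any_cons, hpre, Bool.true_and,
            decide_true, Bool.true_or, if_true, ite_true]
        · simp only [Bool.not_eq_true] at hpre
          simp only [pvALoop, pvFlags, if_neg hh, hsec, hpre, Bool.true_and,
            Bool.false_eq_true, if_false, if_true, ite_true]
          rw [ih]
          simp only [List.takeWhile_cons, List.zip_cons_cons, List.zipWith_cons_cons, pvRep,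
            List.length_cons, List.take_succ_cons, List.drop_succ_cons, List.any_cons,
            hpre, Bool.true_and, Bool.and_false, Bool.false_or, decide_true, if_true,
            ite_true, Bool.false_eq_true, if_false, List.cons_append]
          split_ifs <;> rfl


theorem pvFlags_length (header : String) (xs : List String) (ins : Bool) :
    (pvFlags header xs ins).length = xs.length := by
  induction xs generalizing ins with
  | nil => simp [pvFlags]
  | cons l ls ih => simp [pvFlags, ih]


theorem pvOut_false (pref bullet : String) (xs : List String) :
    List.zipWith (pvRep pref bullet) xs (List.replicate xs.length false) = xs := by
  induction xs with
  | nil => rfl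
  | cons l ls ih => simp [pvRep, List.replicate_succ, ih]


theorem pvALoop_prefix (header pref bullet : String) (pre suf : List String)
    (h : header ∉ pre) :
    pvALoop header pref bullet (pre ++ header :: suf) false false =
      pre ++ header :: pvALoop header pref bullet suf true false := by
  induction pre with
  | nil => simp [pvALoop]
  | cons l ls ih =>
    simp only [List.mem_cons, not_or] at h
    have hl : l ≠ header := fun e => h.1 e.symm
    simp [pvALoop, hl, ih h.2]


theorem pvFlags_prefix (header : String) (pre suf : List String) (h : header ∉ pre) :
    pvFlags header (pre ++ header :: suf) false =
      List.replicate pre.length false ++ true :: pvFlags header suf true := by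
  induction pre with
  | nil => simp [pvFlags]
  | cons l ls ih =>
    simp only [List.mem_cons, not_or] at h
    have hl : l ≠ header := fun e => h.1 e.symm
    simp [pvFlags, hl, ih h.2, List.replicate_succ, ite_self]


theorem pv_assemble (header pref bullet : String)
    (hpf : PySem.Str.startswith header pref = false)
    (pre suf : List String) (hnp : header ∉ pre) :
    pvALoop header pref bullet (pre ++ header :: suf) false false =
      (let lines := pre ++ header :: suf
       let flags := pvFlags header lines false
       let out := List.zipWith (pvRep pref bullet) lines flags
       let e := pvEnd flags (pre.length + 1)
       if pvHit pref lines flags (pre.length + 1) e then out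
       else out.take e ++ bullet :: out.drop e) := by
  have hflags := pvFlags_prefix header pre suf hnp
  have hlenf := pvFlags_length header suf true
  have hout : List.zipWith (pvRep pref bullet) (pre ++ header :: suf)
      (pvFlags header (pre ++ header :: suf) false) =
      pre ++ header :: List.zipWith (pvRep pref bullet) suf (pvFlags header suf true) := by
    rw [hflags, List.zipWith_append (by simp), List.zipWith_cons_cons, pvOut_false]
    have hpf2 := hpf
    rw [PySem.Str.startswith_eq] at hpf2
    simp [pvRep, hpf2]
  have hdrop : (pvFlags header (pre ++ header :: suf) false).drop (pre.length + 1) =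
      pvFlags header suf true := by
    rw [hflags, List.append_cons, List.drop_left' (by simp)]
  have hzip : ((pre ++ header :: suf).zip (pvFlags header (pre ++ header :: suf) false)).drop
      (pre.length + 1) = suf.zip (pvFlags header suf true) := by
    rw [hflags, List.zip_append (by simp), List.zip_cons_cons, List.append_cons,
      List.drop_left' (by simp)]
  rw [pvALoop_prefix header pref bullet pre suf hnp, pvALoop_section header pref bullet hpf suf]
  simp only [pvEnd, pvHit, hdrop, hzip, hout, Nat.add_sub_cancel_left, Nat.add_sub_cancel]
  split_ifs with hhit
  · rfl
  · have e'le : ((pvFlags header suf true).takeWhile (fun b => b)).length ≤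
        (List.zipWith (pvRep pref bullet) suf (pvFlags header suf true)).length := by
      have h1 : ((pvFlags header suf true).takeWhile (fun b => b)).length ≤
          (pvFlags header suf true).length := by
        induction (pvFlags header suf true) with
        | nil => simp
        | cons a l ih => by_cases h : a = true <;> simp [List.takeWhile_cons, h] <;> omega
      simp only [List.length_zipWith, hlenf, Nat.min_self]
      omega
    rw [show pre ++ header :: List.zipWith (pvRep pref bullet) suf (pvFlags header suf true) =
        (pre ++ [header]) ++ List.zipWith (pvRep pref bullet) suf (pvFlags header suf true) by
      simp]
    rw [show pre.length + 1 + ((pvFlags header suf true).takeWhile (fun b => b)).length =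
        (pre ++ [header]).length + ((pvFlags header suf true).takeWhile (fun b => b)).length by
      simp]
    rw [List.take_append, List.drop_append]
    simp [List.take_of_length_le, List.drop_of_length_le, Nat.add_sub_cancel_left]


theorem pvFlags_nohdr (header : String) (xs : List String) (h : header ∉ xs) :
    pvFlags header xs false = List.replicate xs.length false := by
  induction xs with
  | nil => simp [pvFlags]
  | cons l ls ih =>
    simp only [List.mem_cons, not_or] at h
    have hl : l ≠ header := fun e => h.1 e.symm
    simp [pvFlags, hl, ih h.2, List.replicate_succ, ite_self]


theorem pvALoop_nohdr (header pref bullet : String) (xs : List String) (upd : Bool)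
    (h : header ∉ xs) :
    pvALoop header pref bullet xs false upd = xs := by
  induction xs generalizing upd with
  | nil => simp [pvALoop]
  | cons l ls ih =>
    simp only [List.mem_cons, not_or] at h
    have hl : l ≠ header := fun e => h.1 e.symm
    simp [pvALoop, hl, ih upd h.2]


theorem pv_hash_not_dash (t x : String) :
    PySem.Str.startswith ("## " ++ t) ("- " ++ x) = false := by
  rw [Bool.eq_false_iff]
  intro h
  rw [PySem.Str.startswith_eq] at h
  rw [PySem.Chars.startswith_iff] at h
  simp [String.toList_append] at h


theorem pvTakeWhile_le (l : List Bool) : (l.takeWhile (fun b => b)).length ≤ l.length := by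
  induction l with
  | nil => simp
  | cons a l ih => by_cases h : a = true <;> simp [List.takeWhile_cons, h] <;> omega


-- ===== VERDICT (by name: the statement is the Claim_ definition above) =====
theorem upsert_bullet_py_spec : Claim_equal_upsert_bullet_py := by
  intro content section_title key value _
  unfold Spec_upsert_bullet_py
  unfold upsert_bullet_py upsert_bullet_py_alt
  simp only []
  by_cases h : PySem.Str.isIn ("## " ++ section_title) content = true
  · rw [h]
    simp only [Bool.not_true, Bool.false_eq_true, if_false]
    have hpf : PySem.Str.startswith ("## " ++ section_title) ("- " ++ key ++ ":") = false := by
      rw [String.append_assoc]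
      exact pv_hash_not_dash section_title (key ++ ":")
    cases hidx : PySem.List.index? (PySem.Str.splitlines content) ("## " ++ section_title) with
    | none =>
      have hmem : ("## " ++ section_title) ∉ PySem.Str.splitlines content := by
        rw [← PySem.List.index?_eq_none_iff]
        exact hidx
      rw [pvALoop_nohdr _ _ _ _ _ hmem, pvFlags_nohdr _ _ hmem, pvOut_false]
    | some s =>
      have hidx' := hidx
      rw [PySem.List.index?_eq_some_iff] at hidx'
      obtain ⟨pre, suf, hsp, hlen, hmem⟩ := hidx'
      subst hlen
      rw [hsp]
      rw [pv_assemble _ _ _ hpf pre suf hmem]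
      have hle : pvEnd (pvFlags ("## " ++ section_title) (pre ++ ("## " ++ section_title) :: suf) false) (pre.length + 1) ≤
          (List.zipWith (pvRep ("- " ++ key ++ ":") ("- " ++ key ++ ": " ++ value))
            (pre ++ ("## " ++ section_title) :: suf)
            (pvFlags ("## " ++ section_title) (pre ++ ("## " ++ section_title) :: suf) false)).length := by
        have h1 := pvTakeWhile_le ((pvFlags ("## " ++ section_title) (pre ++ ("## " ++ section_title) :: suf) false).drop (pre.length + 1))
        have h2 := pvFlags_length ("## " ++ section_title) (pre ++ ("## " ++ section_title) :: suf) false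
        simp only [pvEnd, List.length_zipWith, h2, Nat.min_self, List.length_drop] at *
        simp only [List.length_append, List.length_cons] at *
        omega
      simp only [PySem.List.insert_natCast _ _ _ hle]
  · simp only [Bool.not_eq_true] at h
    rw [h]
    simp only [Bool.not_false, if_true]
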